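-- pv_equiv track=rewrite | github.com/aoc4fun/allinone2021 | lschamber/python/day17/day17.py | find_possibilities_for_x_at_given_step
-- ===== SOURCE A (Python) =====
-- def find_possibilities_for_x_at_given_step(current_step, trench_x, current_y):
--     def x_pos(initial_velocity):
--         def x_velocity(step):
--             if initial_velocity > 0:
--                 velocity = max(initial_velocity - step, 0)
--             else:
--                 velocity = min(initial_velocity + step, 0)
--             return velocity
--
--         return sum([sum(x_velocity(x) for x in range(current_step))])
--
--     possibilities = set()
--     for possible_velocity in range(0, trench_x[1] + 1):
--         if trench_x[0] <= x_pos(possible_velocity) <= trench_x[1]: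
--             possibilities.add((possible_velocity, current_y))
--     return possibilities
-- ===== SOURCE B (Python) =====
-- def find_possibilities_for_x_at_given_step(current_step, trench_x, current_y):
--     # Closed-form triangular-number distance per velocity instead of summing
--     # the per-step velocities; O(1) per candidate velocity.
--     lo, hi = trench_x[0], trench_x[1]
--     n = max(current_step, 0)
--
--     def tri(k):
--         return k * (k + 1) // 2
--
--     possibilities = set()
--     for v in range(hi + 1):
--         reached = tri(v) - tri(max(v - n, 0))
--         if lo <= reached <= hi:
--             possibilities.add((v, current_y))
--     return possibilities
-- ===== Notes on version B (the rewrite author's own statement) =====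
-- stated objective: faster
-- what changed: Replaces the inner per-step velocity summation with a closed-form triangular-number formula for the distance reached, making each candidate velocity O(1).
import Mathlib
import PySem

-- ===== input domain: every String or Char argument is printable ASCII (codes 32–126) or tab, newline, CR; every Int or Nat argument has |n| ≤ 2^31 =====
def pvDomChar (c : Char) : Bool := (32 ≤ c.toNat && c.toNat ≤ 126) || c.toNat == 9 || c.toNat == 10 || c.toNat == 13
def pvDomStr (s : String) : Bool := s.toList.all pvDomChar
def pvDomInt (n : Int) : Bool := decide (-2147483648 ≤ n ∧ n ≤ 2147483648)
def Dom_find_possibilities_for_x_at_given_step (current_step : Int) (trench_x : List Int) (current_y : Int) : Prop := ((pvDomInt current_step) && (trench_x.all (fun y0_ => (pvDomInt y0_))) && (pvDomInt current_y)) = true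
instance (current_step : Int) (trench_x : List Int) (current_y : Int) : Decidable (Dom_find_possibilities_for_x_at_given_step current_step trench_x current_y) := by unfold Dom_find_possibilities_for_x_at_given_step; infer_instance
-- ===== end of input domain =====

-- B replaces A's inner per-step velocity summation by a closed-form triangular-number
-- formula for the distance reached, making each candidate velocity O(1) (objective: faster).


-- ===== PORT A =====
-- x_velocity(step) for a fixed initial_velocity
def pvXvelA (initial_velocity step : Int) : Int :=
  if initial_velocity > 0 then max (initial_velocity - step) 0
  else min (initial_velocity + step) 0

-- x_pos(initial_velocity): sum of x_velocity over range(current_step)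
def pvXposA (current_step initial_velocity : Int) : Int :=
  ((PySem.List.pyRange 0 current_step 1).map (pvXvelA initial_velocity)).sum

def find_possibilities_for_x_at_given_step (current_step : Int) (trench_x : List Int) (current_y : Int) : List (List Int) :=
  let tx0 := PySem.List.pyGetD trench_x 0 0
  let tx1 := PySem.List.pyGetD trench_x 1 0
  (PySem.List.pyRange 0 (tx1 + 1) 1).foldl
    (fun possibilities possible_velocity =>
      if tx0 ≤ pvXposA current_step possible_velocity ∧ pvXposA current_step possible_velocity ≤ tx1
      then PySem.Set.add possibilities [possible_velocity, current_y]
      else possibilities) []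

-- ===== PORT B =====
-- tri(k) = k*(k+1)//2
def pvTri (k : Int) : Int := PySem.Int.floordiv (k * (k + 1)) 2

def find_possibilities_for_x_at_given_step_alt (current_step : Int) (trench_x : List Int) (current_y : Int) : List (List Int) :=
  let lo := PySem.List.pyGetD trench_x 0 0
  let hi := PySem.List.pyGetD trench_x 1 0
  let n := max current_step 0
  (PySem.List.pyRange 0 (hi + 1) 1).foldl
    (fun possibilities v =>
      if lo ≤ pvTri v - pvTri (max (v - n) 0) ∧ pvTri v - pvTri (max (v - n) 0) ≤ hi
      then PySem.Set.add possibilities [v, current_y]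
      else possibilities) []

-- ===== PRECONDITION & SPEC =====
-- A indexes trench_x[0] and trench_x[1]; it raises IndexError when trench_x has fewer than two elements.
def Pre_find_possibilities_for_x_at_given_step (current_step : Int) (trench_x : List Int) (current_y : Int) : Prop := 2 ≤ trench_x.length
instance (current_step : Int) (trench_x : List Int) (current_y : Int) : Decidable (Pre_find_possibilities_for_x_at_given_step current_step trench_x current_y) := by unfold Pre_find_possibilities_for_x_at_given_step; infer_instance
def pvWitness_find_possibilities_for_x_at_given_step : Int × List Int × Int := (3, [3, 6], -2)

def Spec_find_possibilities_for_x_at_given_step (current_step : Int) (trench_x : List Int) (current_y : Int) (out : List (List Int)) : Prop := out = find_possibilities_for_x_at_given_step_alt current_step trench_x current_y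
instance (current_step : Int) (trench_x : List Int) (current_y : Int) (out : List (List Int)) : Decidable (Spec_find_possibilities_for_x_at_given_step current_step trench_x current_y out) := by unfold Spec_find_possibilities_for_x_at_given_step; infer_instance

-- ===== CLAIM (what is proved, stated in full; the proofs are below) =====
def Claim_equal_find_possibilities_for_x_at_given_step : Prop := ∀ (current_step : Int) (trench_x : List Int) (current_y : Int), Dom_find_possibilities_for_x_at_given_step current_step trench_x current_y → Pre_find_possibilities_for_x_at_given_step current_step trench_x current_y → Spec_find_possibilities_for_x_at_given_step current_step trench_x current_y (find_possibilities_for_x_at_given_step current_step trench_x current_y)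

-- ===== LEMMAS AND PROOFS =====

-- tri(a) - a = tri(a-1), exact because a*(a+1) and (a-1)*a are even
theorem pvTri_sub (a : Int) : pvTri a - a = pvTri (a - 1) := by
  unfold pvTri PySem.Int.floordiv
  rw [show (a - 1) * (a - 1 + 1) = (a - 1) * a by ring,
      show a * (a + 1) = (a - 1) * a + a * 2 by ring,
      Int.add_mul_fdiv_right _ _ (by norm_num)]
  ring

-- the per-step sum of max(v-s,0) over range(m) equals the triangular closed form
theorem pvSum_maxes (v : Int) (hv : 0 ≤ v) : ∀ (m : Nat),
    ((PySem.List.pyRange 0 (m : Int) 1).map (fun s => max (v - s) 0)).sum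
      = pvTri v - pvTri (max (v - m) 0) := by
  intro m
  induction m with
  | zero => simp [PySem.List.pyRange_one_eq_nil (by omega : (0:Int) ≤ 0), max_eq_left hv]
  | succ m ih =>
    rw [show ((m + 1 : Nat) : Int) = (m : Int) + 1 by push_cast; ring,
        PySem.List.pyRange_one_succ_right (by positivity), List.map_append, List.sum_append, ih]
    simp only [List.map_cons, List.map_nil, List.sum_cons, List.sum_nil, add_zero]
    by_cases h : v - m ≤ 0
    · rw [max_eq_right h, max_eq_right (by omega)]
      omega
    · rw [max_eq_left (by omega), max_eq_left (by omega),
          show v - ((m : Int) + 1) = (v - m) - 1 by ring]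
      have := pvTri_sub (v - m)
      omega

-- A's simulated position equals B's closed form, for nonnegative velocities
theorem pvXpos_eq (current_step v : Int) (hv : 0 ≤ v) :
    pvXposA current_step v = pvTri v - pvTri (max (v - max current_step 0) 0) := by
  unfold pvXposA
  by_cases hv' : 0 < v
  · -- v > 0: the x_velocity branch is max (v - s) 0
    have hfun : (PySem.List.pyRange 0 current_step 1).map (pvXvelA v)
        = (PySem.List.pyRange 0 current_step 1).map (fun s => max (v - s) 0) := by
      apply List.map_congr_left
      intro s _
      simp [pvXvelA, hv']
    rw [hfun]
    by_cases hc : current_step ≤ 0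
    · rw [PySem.List.pyRange_one_eq_nil hc]
      simp [max_eq_right hc, max_eq_left hv]
    · have hc' : (0:Int) ≤ current_step := by omega
      have := pvSum_maxes v hv current_step.toNat
      rw [Int.toNat_of_nonneg hc'] at this
      rw [this, max_eq_left hc']
  · -- v = 0 (0 ≤ v and ¬ 0 < v): every summand is min s 0 = 0
    have hv0 : v = 0 := by omega
    subst hv0
    have hz : ∀ x ∈ (PySem.List.pyRange 0 current_step 1).map (pvXvelA 0), x = 0 := by
      intro x hx
      rcases List.mem_map.mp hx with ⟨s, hs, rfl⟩
      have := (PySem.List.mem_pyRange_one.mp hs).1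
      simp [pvXvelA, min_eq_right this]
    rw [List.sum_eq_zero hz]
    have h0 : max (0 - max current_step 0) 0 = 0 := by omega
    rw [h0]
    decide

-- ===== VERDICT (by name: the statement is the Claim_ definition above) =====
theorem find_possibilities_for_x_at_given_step_spec : Claim_equal_find_possibilities_for_x_at_given_step := by
  intro current_step trench_x current_y _ _
  unfold Spec_find_possibilities_for_x_at_given_step
  unfold find_possibilities_for_x_at_given_step find_possibilities_for_x_at_given_step_alt
  apply PySem.List.foldl_congr_mem
  intro acc v hv
  have hv0 : 0 ≤ v := (PySem.List.mem_pyRange_one.mp hv).1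
  rw [pvXpos_eq current_step v hv0]
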